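-- pv_equiv track=rewrite | github.com/select766/pokeai | pokeai/filter_learnsets.py | filter_learnsets
-- ===== SOURCE A (Python) =====
-- def filter_learnsets(valid_pokemons, valid_moves, all_learnsets):
--     filtered = {}
--     moves_set = set(valid_moves)
--     for poke in valid_pokemons:
--         fil = list(set(all_learnsets[poke]) & moves_set)
--         fil.sort()
--         filtered[poke] = fil
--     return filtered
-- ===== SOURCE B (Python) =====
-- def filter_learnsets(valid_pokemons, valid_moves, all_learnsets):
--     valid_sorted = sorted(set(valid_moves))
--     filtered = {}
--     for poke in valid_pokemons:
--         learn_sorted = sorted(set(all_learnsets[poke]))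
--         fil = []
--         i = j = 0
--         while i < len(learn_sorted) and j < len(valid_sorted):
--             a = learn_sorted[i]
--             b = valid_sorted[j]
--             if a < b:
--                 i += 1
--             elif b < a:
--                 j += 1
--             else:
--                 fil.append(a)
--                 i += 1
--                 j += 1
--         filtered[poke] = fil
--     return filtered
-- ===== Notes on version B (the rewrite author's own statement) =====
-- stated objective: alternative
-- what changed: B replaces A's hash-set intersection followed by a sort with a comparison-based two-pointer merge: both the valid-move table (once) and each learnset are sorted-deduplicated, and the intersection is produced already sorted by merging the two sorted lists.
import Mathlib
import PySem

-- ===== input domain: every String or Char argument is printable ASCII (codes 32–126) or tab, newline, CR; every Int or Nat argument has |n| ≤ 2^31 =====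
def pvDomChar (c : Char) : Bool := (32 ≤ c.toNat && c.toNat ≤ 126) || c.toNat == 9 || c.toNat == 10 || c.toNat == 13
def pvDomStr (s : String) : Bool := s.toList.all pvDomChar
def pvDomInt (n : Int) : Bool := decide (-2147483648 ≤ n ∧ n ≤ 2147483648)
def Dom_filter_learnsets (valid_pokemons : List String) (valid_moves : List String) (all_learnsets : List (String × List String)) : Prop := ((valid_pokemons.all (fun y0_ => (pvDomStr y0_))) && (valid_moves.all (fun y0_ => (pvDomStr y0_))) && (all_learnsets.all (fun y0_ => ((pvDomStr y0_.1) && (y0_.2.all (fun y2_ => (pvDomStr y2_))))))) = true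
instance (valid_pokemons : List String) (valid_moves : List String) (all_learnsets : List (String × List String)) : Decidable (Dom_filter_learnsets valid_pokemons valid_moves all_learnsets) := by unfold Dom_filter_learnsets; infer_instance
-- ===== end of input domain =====

-- B replaces A's hash-set intersection + sort with a two-pointer merge of two sorted deduplicated lists (alternative decomposition, not claimed faster).
-- ===== PORT A =====
-- 'all_learnsets[poke]' ported as first-match dict lookup; getD [] is only reached outside Pre_.
def filter_learnsets (valid_pokemons : List String) (valid_moves : List String) (all_learnsets : List (String × List String)) : List (String × List String) :=
  let moves_set : PySem.Set String := PySem.Set.ofList valid_moves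
  (valid_pokemons.foldl (fun (filtered : PySem.Dict String (List String)) poke =>
      let fil := PySem.List.sorted
        (PySem.Set.inter (PySem.Set.ofList ((PySem.Dict.mk all_learnsets).getD poke [])) moves_set)
        (fun x => x) false
      filtered.insert poke fil) PySem.Dict.empty).items

-- ===== PORT B =====
-- the index-based while loop of Source B as the obvious structural recursion on the two sorted lists
def pvMerge : List String → List String → List String
  | [], _ => []
  | _ :: _, [] => []
  | a :: as, b :: bs =>
    if a < b then pvMerge as (b :: bs)
    else if b < a then pvMerge (a :: as) bs
    else a :: pvMerge as bs
termination_by xs ys => xs.length + ys.length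
decreasing_by all_goals simp <;> omega

def filter_learnsets_alt (valid_pokemons : List String) (valid_moves : List String) (all_learnsets : List (String × List String)) : List (String × List String) :=
  let valid_sorted := PySem.List.sorted (PySem.Set.ofList valid_moves) (fun x => x) false
  (valid_pokemons.foldl (fun (filtered : PySem.Dict String (List String)) poke =>
      let learn_sorted := PySem.List.sorted
        (PySem.Set.ofList ((PySem.Dict.mk all_learnsets).getD poke [])) (fun x => x) false
      filtered.insert poke (pvMerge learn_sorted valid_sorted)) PySem.Dict.empty).items

-- ===== PRECONDITION & SPEC =====
-- Pre_ excludes only the inputs where A raises KeyError: a pokemon without an entry in all_learnsets.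
def Pre_filter_learnsets (valid_pokemons : List String) (valid_moves : List String) (all_learnsets : List (String × List String)) : Prop :=
  ∀ p ∈ valid_pokemons, (PySem.Dict.mk all_learnsets).contains p = true
instance (valid_pokemons : List String) (valid_moves : List String) (all_learnsets : List (String × List String)) : Decidable (Pre_filter_learnsets valid_pokemons valid_moves all_learnsets) := by unfold Pre_filter_learnsets; infer_instance
def pvWitness_filter_learnsets : List String × List String × (List (String × List String)) :=
  (["pika"], ["tackle", "surf"], [("pika", ["tackle", "growl"])])
def Spec_filter_learnsets (valid_pokemons : List String) (valid_moves : List String) (all_learnsets : List (String × List String)) (out : List (String × List String)) : Prop := out = filter_learnsets_alt valid_pokemons valid_moves all_learnsets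
instance (valid_pokemons : List String) (valid_moves : List String) (all_learnsets : List (String × List String)) (out : List (String × List String)) : Decidable (Spec_filter_learnsets valid_pokemons valid_moves all_learnsets out) := by unfold Spec_filter_learnsets; infer_instance

-- ===== CLAIM (what is proved, stated in full; the proofs are below) =====
def Claim_equal_filter_learnsets : Prop := ∀ (valid_pokemons : List String) (valid_moves : List String) (all_learnsets : List (String × List String)), Dom_filter_learnsets valid_pokemons valid_moves all_learnsets → Pre_filter_learnsets valid_pokemons valid_moves all_learnsets → Spec_filter_learnsets valid_pokemons valid_moves all_learnsets (filter_learnsets valid_pokemons valid_moves all_learnsets)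

-- ===== LEMMAS AND PROOFS =====

-- merging two strictly increasing lists yields the intersection, in the order of the first list
theorem pvMerge_eq (xs ys : List String) (hx : xs.Pairwise (· < ·)) (hy : ys.Pairwise (· < ·)) :
    pvMerge xs ys = xs.filter (fun m => decide (m ∈ ys)) := by
  induction xs, ys using pvMerge.induct with
  | case1 ys => simp [pvMerge]
  | case2 a as => simp [pvMerge]
  | case3 a as b bs hab ih =>
    have hnb : a ∉ b :: bs := by
      intro hmem
      rcases List.mem_cons.mp hmem with h | h
      · exact absurd hab (by simp [h])
      · exact absurd (lt_trans hab ((List.pairwise_cons.mp hy).1 _ h)) (lt_irrefl a)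
    rw [pvMerge, if_pos hab]
    simp only [List.filter_cons, decide_eq_true_eq]
    rw [ih (List.Pairwise.of_cons hx) hy]
    simp [hnb]
  | case4 a as b bs hab hba ih =>
    rw [pvMerge, if_neg hab, if_pos hba]
    rw [ih hx (List.Pairwise.of_cons hy)]
    apply List.filter_congr
    intro x hxmem
    have hbx : b < x := by
      rcases List.mem_cons.mp hxmem with h | h
      · exact h ▸ hba
      · exact lt_trans hba ((List.pairwise_cons.mp hx).1 _ h)
    simp [List.mem_cons, ne_of_gt hbx]
  | case5 a as b bs hab hba ih =>
    have heq : a = b := le_antisymm (not_lt.mp hba) (not_lt.mp hab)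
    rw [pvMerge, if_neg hab, if_neg hba]
    rw [ih (List.Pairwise.of_cons hx) (List.Pairwise.of_cons hy)]
    have : (a :: as).filter (fun m => decide (m ∈ b :: bs)) =
        a :: as.filter (fun m => decide (m ∈ bs)) := by
      simp only [List.filter_cons, decide_eq_true_eq]
      rw [if_pos (heq ▸ List.mem_cons_self)]
      congr 1
      apply List.filter_congr
      intro x hxmem
      have hax : a < x := (List.pairwise_cons.mp hx).1 _ hxmem
      simp [List.mem_cons, ne_of_gt (heq ▸ hax)]
    rw [this]

-- per-pokemon values coincide: sorted intersection = merge of the two sorted dedup lists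
theorem fil_eq (ls vm : List String) :
    PySem.List.sorted (PySem.Set.inter (PySem.Set.ofList ls) (PySem.Set.ofList vm)) (fun x => x) false
      = pvMerge (PySem.List.sorted (PySem.Set.ofList ls) (fun x => x) false)
                (PySem.List.sorted (PySem.Set.ofList vm) (fun x => x) false) := by
  rw [pvMerge_eq _ _ (PySem.List.sorted_ofList_pairwise_lt ls) (PySem.List.sorted_ofList_pairwise_lt vm)]
  apply PySem.List.sorted_eq_of_perm_of_pairwise_lt
  · rw [List.perm_ext_iff_of_nodup]
    · intro a
      simp [List.mem_filter, PySem.List.mem_sorted, PySem.Set.mem_inter, PySem.Set.mem_ofList]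
    · exact List.Nodup.filter _
        ((PySem.List.sorted_perm _ _ _).nodup_iff.mpr (PySem.Set.nodup_ofList ls))
    · exact PySem.Set.nodup_inter _ _ (PySem.Set.nodup_ofList ls)
  · exact (PySem.List.sorted_ofList_pairwise_lt ls).filter _

theorem filter_learnsets_eq (valid_pokemons valid_moves : List String) (all_learnsets : List (String × List String)) :
    filter_learnsets valid_pokemons valid_moves all_learnsets
      = filter_learnsets_alt valid_pokemons valid_moves all_learnsets := by
  show PySem.Dict.items (List.foldl _ PySem.Dict.empty valid_pokemons) = PySem.Dict.items (List.foldl _ PySem.Dict.empty valid_pokemons)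
  congr 1
  apply PySem.List.foldl_congr_mem
  intro d poke _
  simp only [fil_eq]

-- ===== VERDICT (by name: the statement is the Claim_ definition above) =====
theorem filter_learnsets_spec : Claim_equal_filter_learnsets := by
  intro vp vm als _ _
  exact filter_learnsets_eq vp vm als
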